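-- pv_equiv track=rewrite | github.com/teedobey/advent-of-code-2023 | day15b.py | process
-- ===== SOURCE A (Python) =====
-- def process(cmds):
--     mp = [[] for x in range(0, 256)]
--     pow = [[] for x in range(0,256)]
--     for cmd in cmds:
--         label = cmd.split("=")[0].split("-")[0]
--         if "=" in cmd:
--             power = int(cmd.split("=")[1])
--             box = hash(label)
--             if label in mp[box]:
--                 idx = mp[box].index(label)
--                 pow[box][idx] = power
--             else:
--                 mp[box].append(label)
--                 pow[box].append(power)
--         elif "-" in cmd:
--             box = hash(label)
--             if label in mp[box]:
--                 idx = mp[box].index(label)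
--                 mp[box].remove(label)
--                 del pow[box][idx]
--     return (mp, pow)
--
-- def hash(s):
--     current = 0
--     for ch in s:
--         current += ord(ch)
--         current *= 17
--         current %= 256
--     return current
-- ===== SOURCE B (Python) =====
-- def hash(s):
--     current = 0
--     for ch in s:
--         current += ord(ch)
--         current *= 17
--         current %= 256
--     return current
--
-- def process(cmds):
--     d = {}
--     for cmd in cmds:
--         label = cmd.split("=")[0].split("-")[0]
--         if "=" in cmd:
--             d[label] = int(cmd.split("=")[1])
--         elif "-" in cmd:
--             d.pop(label, None)
--     mp = [[] for _ in range(256)]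
--     pow = [[] for _ in range(256)]
--     for label, power in d.items():
--         box = hash(label)
--         mp[box].append(label)
--         pow[box].append(power)
--     return (mp, pow)
-- ===== Notes on version B (the rewrite author's own statement) =====
-- stated objective: alternative
-- what changed: B replaces A's 256 per-box parallel label/power lists with per-command membership scans by one insertion-ordered dict label->power (Python dicts keep position on update, append on new keys), then one final grouping pass over d.items() that distributes entries into the 256 boxes by hash.
import Mathlib
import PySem

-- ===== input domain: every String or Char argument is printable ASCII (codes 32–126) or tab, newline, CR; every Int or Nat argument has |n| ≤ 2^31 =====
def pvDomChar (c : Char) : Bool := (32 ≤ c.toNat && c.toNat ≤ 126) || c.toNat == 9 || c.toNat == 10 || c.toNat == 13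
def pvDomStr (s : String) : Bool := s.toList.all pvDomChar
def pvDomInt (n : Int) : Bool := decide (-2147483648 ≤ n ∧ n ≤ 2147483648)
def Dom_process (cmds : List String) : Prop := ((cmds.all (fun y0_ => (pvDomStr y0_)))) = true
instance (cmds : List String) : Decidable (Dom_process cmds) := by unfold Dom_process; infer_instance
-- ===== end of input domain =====

-- B replaces A's 256 per-box label/power lists (scanned per command) with one insertion-ordered
-- dict label->power plus a single final grouping pass over its items; same return value.


-- ===== PORT A =====
-- helper `hash` (Source A and Source B define the identical function; ported once, used by both ports)
def pyHashHelper (s : String) : Int :=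
  s.toList.foldl (fun current ch => PySem.Int.mod ((current + (ch.toNat : Int)) * 17) 256) 0

-- cmd.split("=")[0].split("-")[0]; split? is `some` (sep ≠ "") and never empty, so getD/headD are exact
def labelOf (cmd : String) : String :=
  ((PySem.Str.split? (((PySem.Str.split? cmd "=").getD []).headD "") "-").getD []).headD ""

-- int(cmd.split("=")[1]); the [1] exists whenever "=" ∈ cmd; ofStr? = none (ValueError) is excluded by Pre_
def powerOf (cmd : String) : Int :=
  (PySem.Int.ofStr? (((PySem.Str.split? cmd "=").getD []).getD 1 "")).getD 0

-- the body of A's `for cmd in cmds` loop; hash returns a value in [0,256), so .toNat and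
-- the guarded getD/index?-getD are exact transcriptions of Python's indexing
def stepA (st : List (List String) × List (List Int)) (cmd : String) :
    List (List String) × List (List Int) :=
  let label := labelOf cmd
  if PySem.Str.isIn "=" cmd then
    let power := powerOf cmd
    let box := (pyHashHelper label).toNat
    let row := st.1.getD box []
    if row.contains label then
      let idx := (PySem.List.index? row label).getD 0
      (st.1, st.2.set box ((st.2.getD box []).set idx power))
    else
      (st.1.set box (row ++ [label]), st.2.set box ((st.2.getD box []) ++ [power]))
  else if PySem.Str.isIn "-" cmd then
    let box := (pyHashHelper label).toNat
    let row := st.1.getD box []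
    if row.contains label then
      let idx := (PySem.List.index? row label).getD 0
      (st.1.set box ((PySem.List.remove? row label).getD row),
       st.2.set box ((st.2.getD box []).eraseIdx idx))  -- del pow[box][idx]
    else st
  else st

def process (cmds : List String) : List (List String) × List (List Int) :=
  cmds.foldl stepA (List.replicate 256 [], List.replicate 256 [])

-- ===== PORT B =====
-- the body of B's first loop: one dict, d[label] = power / d.pop(label, None)
def stepB (d : PySem.Dict String Int) (cmd : String) : PySem.Dict String Int :=
  let label := labelOf cmd
  if PySem.Str.isIn "=" cmd then
    d.insert label (powerOf cmd)
  else if PySem.Str.isIn "-" cmd then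
    d.erase label  -- d.pop(label, None): the returned value is discarded
  else d

-- the body of B's final grouping loop over d.items()
def groupStep (st : List (List String) × List (List Int)) (p : String × Int) :
    List (List String) × List (List Int) :=
  let box := (pyHashHelper p.1).toNat
  (st.1.set box ((st.1.getD box []) ++ [p.1]), st.2.set box ((st.2.getD box []) ++ [p.2]))

def process_alt (cmds : List String) : List (List String) × List (List Int) :=
  ((cmds.foldl stepB PySem.Dict.empty).items).foldl groupStep
    (List.replicate 256 [], List.replicate 256 [])

-- ===== PRECONDITION & SPEC =====
-- Pre_ excludes exactly the inputs where A raises ValueError: a command containing "=" whose part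
-- after the first "=" is not int()-parsable (e.g. "a=", "a=x"); B raises identically there.
def Pre_process (cmds : List String) : Prop :=
  ∀ cmd ∈ cmds, PySem.Str.isIn "=" cmd = true →
    (PySem.Int.ofStr? (((PySem.Str.split? cmd "=").getD []).getD 1 "")).isSome = true
instance (cmds : List String) : Decidable (Pre_process cmds) := by unfold Pre_process; infer_instance
def pvWitness_process : List String := ["ab=3", "cd-", "ab=5", "cm=1", "ab"]

def Spec_process (cmds : List String) (out : List (List String) × List (List Int)) : Prop := out = process_alt cmds
instance (cmds : List String) (out : List (List String) × List (List Int)) : Decidable (Spec_process cmds out) := by unfold Spec_process; infer_instance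

-- ===== CLAIM (what is proved, stated in full; the proofs are below) =====
def Claim_equal_process : Prop := ∀ (cmds : List String), Dom_process cmds → Pre_process cmds → Spec_process cmds (process cmds)

-- ===== LEMMAS AND PROOFS =====

-- proof-only abbreviations
def boxOf (s : String) : Nat := (pyHashHelper s).toNat

def Fb (b : Nat) (its : List (String × Int)) : List (String × Int) :=
  its.filter (fun p => boxOf p.1 == b)

def Gr (its : List (String × Int)) : List (List String) × List (List Int) :=
  ((List.range 256).map (fun b => (Fb b its).map Prod.fst),
   (List.range 256).map (fun b => (Fb b its).map Prod.snd))

theorem pyHash_fold_bounds (cs : List Char) (c : Int) (h0 : 0 ≤ c) (h1 : c < 256) :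
    0 ≤ cs.foldl (fun current ch => PySem.Int.mod ((current + (ch.toNat : Int)) * 17) 256) c ∧
    cs.foldl (fun current ch => PySem.Int.mod ((current + (ch.toNat : Int)) * 17) 256) c < 256 := by
  induction cs generalizing c with
  | nil => exact ⟨h0, h1⟩
  | cons a l ih =>
      exact ih _ (PySem.Int.mod_nonneg _ (by norm_num)) (PySem.Int.mod_lt _ (by norm_num))

theorem pyHash_bounds (s : String) : 0 ≤ pyHashHelper s ∧ pyHashHelper s < 256 :=
  pyHash_fold_bounds s.toList 0 le_rfl (by norm_num)

theorem boxOf_lt (s : String) : boxOf s < 256 := by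
  have := pyHash_bounds s
  unfold boxOf
  omega

theorem set_range_map {α : Type} (f : Nat → α) (n b : Nat) (x : α) (_hb : b < n) :
    ((List.range n).map f).set b x = (List.range n).map (fun i => if i = b then x else f i) := by
  apply List.ext_getElem
  · simp
  · intro i h1 h2
    simp only [List.getElem_set, List.getElem_map, List.getElem_range]
    by_cases hib : b = i <;> simp [hib]
    intro h; omega

theorem Fb_append (b : Nat) (l : List (String × Int)) (p : String × Int) :
    Fb b (l ++ [p]) = Fb b l ++ (if boxOf p.1 == b then [p] else []) := by
  simp [Fb, List.filter_append, List.filter_singleton]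

theorem Gr_append (its : List (String × Int)) (p : String × Int) :
    Gr (its ++ [p]) = groupStep (Gr its) p := by
  have hb : boxOf p.1 < 256 := boxOf_lt p.1
  have hbox : (pyHashHelper p.1).toNat = boxOf p.1 := rfl
  unfold Gr groupStep
  simp only [hbox]
  rw [PySem.List.getD_map_range _ _ _ _ hb, PySem.List.getD_map_range _ _ _ _ hb,
      set_range_map _ _ _ _ hb, set_range_map _ _ _ _ hb]
  apply Prod.ext <;>
  · simp only []
    apply List.map_congr_left
    intro i hi
    rw [Fb_append]
    by_cases h : i = boxOf p.1
    · subst h; simp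
    · have : (boxOf p.1 == i) = false := by simp [Ne.symm h]
      simp [this, h]

theorem group_eq (its : List (String × Int)) :
    its.foldl groupStep (List.replicate 256 [], List.replicate 256 []) = Gr its := by
  induction its using List.reverseRecOn with
  | nil =>
      simp only [List.foldl_nil, Gr, Fb, List.filter_nil, List.map_nil]
      rw [List.map_const', List.map_const', List.length_range]
  | append_singleton l p ih => rw [List.foldl_append, List.foldl_cons, List.foldl_nil, ih, ← Gr_append]

-- the "=" update function applied to d.items by Dict.insert on a present key
def updF (label : String) (power : Int) (q : String × Int) : String × Int :=
  if q.1 == label then (label, power) else q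

theorem fst_updF (label : String) (power : Int) (q : String × Int) :
    (updF label power q).1 = q.1 := by
  unfold updF
  split_ifs with h
  · exact (beq_iff_eq.mp h).symm
  · rfl

theorem Fb_map_updF (b : Nat) (label : String) (power : Int) (its : List (String × Int)) :
    Fb b (its.map (updF label power)) = (Fb b its).map (updF label power) := by
  unfold Fb
  rw [List.filter_map]
  congr 1
  apply List.filter_congr
  intro q _
  simp [Function.comp, fst_updF]

theorem map_fst_map_updF (label : String) (power : Int) (l : List (String × Int)) :
    (l.map (updF label power)).map Prod.fst = l.map Prod.fst := by
  rw [List.map_map]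
  apply List.map_congr_left
  intro q _
  exact fst_updF label power q

theorem map_updF_noop (label : String) (power : Int) (l : List (String × Int))
    (h : label ∉ l.map Prod.fst) : l.map (updF label power) = l := by
  conv_rhs => rw [← List.map_id l]
  apply List.map_congr_left
  intro q hq
  have : q.1 ≠ label := fun he => h (he ▸ List.mem_map_of_mem hq)
  simp [updF, this]

theorem mem_row_iff (label : String) (its : List (String × Int)) :
    label ∈ (Fb (boxOf label) its).map Prod.fst ↔ label ∈ its.map Prod.fst := by
  constructor
  · intro h
    exact ((List.filter_sublist).map Prod.fst).mem h
  · intro h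
    rcases List.mem_map.mp h with ⟨q, hq, hq1⟩
    exact List.mem_map.mpr ⟨q, List.mem_filter.mpr ⟨hq, by simp [hq1]⟩, hq1⟩

theorem snd_map_update (label : String) (power : Int) (l : List (String × Int))
    (hnd : (l.map Prod.fst).Nodup) (hm : label ∈ l.map Prod.fst) :
    (l.map (updF label power)).map Prod.snd
      = (l.map Prod.snd).set ((List.idxOf? label (l.map Prod.fst)).getD 0) power := by
  induction l with
  | nil => simp at hm
  | cons q t ih =>
      by_cases hq : q.1 = label
      · have hb : (q.1 == label) = true := beq_iff_eq.mpr hq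
        have ht : label ∉ t.map Prod.fst := by
          simp only [List.map_cons, List.nodup_cons] at hnd
          rw [← hq]; exact hnd.1
        simp only [List.map_cons, List.idxOf?_cons, hq, beq_self_eq_true, if_true]
        rw [map_updF_noop label power t ht]
        simp [updF, hb]
      · have hb : (q.1 == label) = false := by simp [hq]
        have hm' : label ∈ t.map Prod.fst := by
          simp only [List.map_cons, List.mem_cons] at hm
          tauto
        have hnd' : (t.map Prod.fst).Nodup := by
          simp only [List.map_cons, List.nodup_cons] at hnd; exact hnd.2
        have hsome := List.isSome_idxOf?.mpr hm'
        rcases Option.isSome_iff_exists.mp hsome with ⟨i, hi⟩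
        simp only [List.map_cons, List.idxOf?_cons, hb, hi, Option.map_some, updF]
        have := ih hnd' hm'
        rw [hi] at this
        simp only [Option.getD_some] at this
        rw [this]
        simp

theorem filter_ne_noop (label : String) (l : List (String × Int))
    (h : label ∉ l.map Prod.fst) : l.filter (fun q => !(q.1 == label)) = l := by
  apply List.filter_eq_self.mpr
  intro q hq
  have : q.1 ≠ label := fun he => h (he ▸ List.mem_map_of_mem hq)
  simp [this]

theorem erase_filter (label : String) (l : List (String × Int))
    (hnd : (l.map Prod.fst).Nodup) (hm : label ∈ l.map Prod.fst) :
    (l.filter (fun q => !(q.1 == label))).map Prod.fst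
        = (l.map Prod.fst).eraseIdx ((List.idxOf? label (l.map Prod.fst)).getD 0)
    ∧ (l.filter (fun q => !(q.1 == label))).map Prod.snd
        = (l.map Prod.snd).eraseIdx ((List.idxOf? label (l.map Prod.fst)).getD 0) := by
  induction l with
  | nil => simp at hm
  | cons q t ih =>
      by_cases hq : q.1 = label
      · have ht : label ∉ t.map Prod.fst := by
          simp only [List.map_cons, List.nodup_cons] at hnd
          rw [← hq]; exact hnd.1
        simp only [List.map_cons, List.idxOf?_cons, hq, beq_self_eq_true, if_true,
          Option.getD_some, List.filter_cons, Bool.not_true, List.eraseIdx_cons_zero]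
        rw [filter_ne_noop label t ht]
        simp
      · have hb : (q.1 == label) = false := by simp [hq]
        have hm' : label ∈ t.map Prod.fst := by
          simp only [List.map_cons, List.mem_cons] at hm; tauto
        have hnd' : (t.map Prod.fst).Nodup := by
          simp only [List.map_cons, List.nodup_cons] at hnd; exact hnd.2
        rcases Option.isSome_iff_exists.mp (List.isSome_idxOf?.mpr hm') with ⟨i, hi⟩
        have := ih hnd' hm'
        rw [hi] at this
        simp only [Option.getD_some] at this
        simp [List.idxOf?_cons, hb, hi, this.1, this.2]

-- the two Fb-vs-dict-operation commutation facts for the "-" branch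
theorem Fb_filter_ne (b : Nat) (label : String) (its : List (String × Int)) (hb : b ≠ boxOf label) :
    Fb b (its.filter (fun q => !(q.1 == label))) = Fb b its := by
  unfold Fb
  rw [List.filter_filter]
  apply List.filter_congr
  intro q _
  by_cases h : boxOf q.1 = b
  · have : q.1 ≠ label := fun he => hb (by rw [← he, h])
    simp [h, this]
  · simp [h]

theorem Fb_filter_box (label : String) (its : List (String × Int)) :
    Fb (boxOf label) (its.filter (fun q => !(q.1 == label)))
      = (Fb (boxOf label) its).filter (fun q => !(q.1 == label)) := by
  unfold Fb
  rw [List.filter_filter, List.filter_filter]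
  apply List.filter_congr
  intro q _
  exact Bool.and_comm _ _

theorem Fb_nodup_fst (b : Nat) (its : List (String × Int))
    (hnd : (its.map Prod.fst).Nodup) : ((Fb b its).map Prod.fst).Nodup :=
  ((List.filter_sublist).map Prod.fst).nodup hnd

theorem Gr_fst_getD (its : List (String × Int)) (b : Nat) (hb : b < 256) :
    (Gr its).1.getD b [] = (Fb b its).map Prod.fst :=
  PySem.List.getD_map_range _ _ _ _ hb

theorem Gr_snd_getD (its : List (String × Int)) (b : Nat) (hb : b < 256) :
    (Gr its).2.getD b [] = (Fb b its).map Prod.snd :=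
  PySem.List.getD_map_range _ _ _ _ hb

theorem not_mem_row_ne (label : String) (b : Nat) (its : List (String × Int))
    (hb : b ≠ boxOf label) : label ∉ (Fb b its).map Prod.fst := by
  intro h
  rcases List.mem_map.mp h with ⟨q, hq, hq1⟩
  have hq2 : boxOf q.1 = b := beq_iff_eq.mp (List.mem_filter.mp hq).2
  exact hb (by rw [← hq1, hq2])

theorem Gr_update (label : String) (power : Int) (its : List (String × Int))
    (hnd : (its.map Prod.fst).Nodup) (hm : label ∈ its.map Prod.fst) :
    ((Gr its).1,
     (Gr its).2.set (boxOf label) (((Fb (boxOf label) its).map Prod.snd).set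
       ((List.idxOf? label ((Fb (boxOf label) its).map Prod.fst)).getD 0) power))
      = Gr (its.map (updF label power)) := by
  have hb := boxOf_lt label
  have hmrow := (mem_row_iff label its).mpr hm
  apply Prod.ext
  · show (Gr its).1 = (Gr (its.map (updF label power))).1
    unfold Gr
    dsimp only
    apply List.map_congr_left
    intro b _
    rw [Fb_map_updF, map_fst_map_updF]
  · show _ = (Gr (its.map (updF label power))).2
    unfold Gr
    dsimp only
    rw [set_range_map _ _ _ _ hb]
    apply List.map_congr_left
    intro b hbmem
    rw [Fb_map_updF]
    by_cases h : b = boxOf label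
    · subst h
      rw [if_pos rfl, snd_map_update label power _ (Fb_nodup_fst _ _ hnd) hmrow]
    · rw [if_neg h, map_updF_noop label power _ (not_mem_row_ne label b its h)]

theorem Gr_erase (label : String) (its : List (String × Int))
    (hnd : (its.map Prod.fst).Nodup) (hm : label ∈ its.map Prod.fst) :
    ((Gr its).1.set (boxOf label) (((Fb (boxOf label) its).map Prod.fst).eraseIdx
       ((List.idxOf? label ((Fb (boxOf label) its).map Prod.fst)).getD 0)),
     (Gr its).2.set (boxOf label) (((Fb (boxOf label) its).map Prod.snd).eraseIdx
       ((List.idxOf? label ((Fb (boxOf label) its).map Prod.fst)).getD 0)))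
      = Gr (its.filter (fun q => !(q.1 == label))) := by
  have hb := boxOf_lt label
  have hmrow := (mem_row_iff label its).mpr hm
  have hef := erase_filter label (Fb (boxOf label) its) (Fb_nodup_fst _ _ hnd) hmrow
  apply Prod.ext
  · show _ = (Gr _).1
    unfold Gr
    dsimp only
    rw [set_range_map _ _ _ _ hb]
    apply List.map_congr_left
    intro b _
    by_cases h : b = boxOf label
    · subst h
      rw [if_pos rfl, Fb_filter_box, hef.1]
    · rw [if_neg h, Fb_filter_ne b label its h]
  · show _ = (Gr _).2
    unfold Gr
    dsimp only
    rw [set_range_map _ _ _ _ hb]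
    apply List.map_congr_left
    intro b _
    by_cases h : b = boxOf label
    · subst h
      rw [if_pos rfl, Fb_filter_box, hef.2]
    · rw [if_neg h, Fb_filter_ne b label its h]

theorem remove?_getD (row : List String) (label : String) (h : label ∈ row) :
    (PySem.List.remove? row label).getD row
      = row.eraseIdx ((List.idxOf? label row).getD 0) := by
  rcases Option.isSome_iff_exists.mp (List.isSome_idxOf?.mpr h) with ⟨i, hi⟩
  simp [PySem.List.remove?, hi]

theorem step_comm (d : PySem.Dict String Int) (cmd : String)
    (hnd : d.keys.Nodup) : stepA (Gr d.items) cmd = Gr (stepB d cmd).items := by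
  have hnd' : (d.items.map Prod.fst).Nodup := hnd
  have hb : boxOf (labelOf cmd) < 256 := boxOf_lt (labelOf cmd)
  have hbox : (pyHashHelper (labelOf cmd)).toNat = boxOf (labelOf cmd) := rfl
  have hrow := Gr_fst_getD d.items (boxOf (labelOf cmd)) hb
  have hcontains : ((Fb (boxOf (labelOf cmd)) d.items).map Prod.fst).contains (labelOf cmd)
      = d.contains (labelOf cmd) := by
    by_cases h : labelOf cmd ∈ d.items.map Prod.fst
    · rw [List.contains_iff_mem.mpr ((mem_row_iff _ _).mpr h),
        (PySem.Dict.contains_iff_mem_keys d _).mpr h]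
    · have h1 : ((Fb (boxOf (labelOf cmd)) d.items).map Prod.fst).contains (labelOf cmd) = false := by
        rw [← Bool.not_eq_true]
        exact fun hc => h ((mem_row_iff _ _).mp (List.contains_iff_mem.mp hc))
      have h2 : d.contains (labelOf cmd) = false := by
        rw [← Bool.not_eq_true]
        exact fun hc => h ((PySem.Dict.contains_iff_mem_keys d _).mp hc)
      rw [h1, h2]
  have hsnd := Gr_snd_getD d.items (boxOf (labelOf cmd)) hb
  have hidx : PySem.List.index? ((Fb (boxOf (labelOf cmd)) d.items).map Prod.fst) (labelOf cmd)
      = List.idxOf? (labelOf cmd) ((Fb (boxOf (labelOf cmd)) d.items).map Prod.fst) := rfl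
  unfold stepA stepB
  by_cases h1 : PySem.Str.isIn "=" cmd = true
  · simp only [h1, if_true, hbox]
    rw [hrow, hcontains]
    by_cases h2 : d.contains (labelOf cmd) = true
    · rw [if_pos h2, hsnd, hidx]
      have hm : labelOf cmd ∈ d.items.map Prod.fst :=
        (PySem.Dict.contains_iff_mem_keys d _).mp h2
      have hitems : (d.insert (labelOf cmd) (powerOf cmd)).items
          = d.items.map (updF (labelOf cmd) (powerOf cmd)) :=
        PySem.Dict.items_insert_of_contains d _ h2
      rw [hitems]
      exact Gr_update (labelOf cmd) (powerOf cmd) d.items hnd' hm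
    · rw [if_neg h2,
        PySem.Dict.items_insert_of_not_contains d _ ((Bool.not_eq_true _).mp h2),
        Gr_append]
      unfold groupStep
      dsimp only
      rw [hbox, hrow, hsnd]
  · simp only [h1, Bool.false_eq_true, if_false, hbox]
    by_cases h3 : PySem.Str.isIn "-" cmd = true
    · simp only [h3, if_true]
      rw [hrow, hcontains]
      have herase : (d.erase (labelOf cmd)).items
          = d.items.filter (fun q => !(q.1 == labelOf cmd)) := rfl
      by_cases h2 : d.contains (labelOf cmd) = true
      · rw [if_pos h2, hsnd, hidx]
        have hm : labelOf cmd ∈ d.items.map Prod.fst :=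
          (PySem.Dict.contains_iff_mem_keys d _).mp h2
        have hmrow := (mem_row_iff (labelOf cmd) d.items).mpr hm
        rw [remove?_getD _ _ hmrow, herase]
        exact Gr_erase (labelOf cmd) d.items hnd' hm
      · rw [if_neg h2, herase,
          filter_ne_noop (labelOf cmd) d.items
            (fun hm => h2 ((PySem.Dict.contains_iff_mem_keys d _).mpr hm))]
    · simp only [h3, Bool.false_eq_true, if_false]

theorem stepB_nodup (d : PySem.Dict String Int) (cmd : String)
    (hnd : d.keys.Nodup) : (stepB d cmd).keys.Nodup := by
  unfold stepB
  split_ifs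
  · exact PySem.Dict.nodup_keys_insert _ _ _ hnd
  · simp only [PySem.Dict.keys, PySem.Dict.erase] at *
    exact ((List.filter_sublist).map _).nodup hnd
  · exact hnd

theorem main_loop (cmds : List String) (d : PySem.Dict String Int) (hnd : d.keys.Nodup) :
    cmds.foldl stepA (Gr d.items) = Gr ((cmds.foldl stepB d).items) := by
  induction cmds generalizing d with
  | nil => rfl
  | cons c cs ih =>
      simp only [List.foldl_cons]
      rw [step_comm d c hnd, ih _ (stepB_nodup d c hnd)]

-- ===== VERDICT (by name: the statement is the Claim_ definition above) =====
theorem process_spec : Claim_equal_process := by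
  intro cmds _ _
  unfold Spec_process process process_alt
  have h0 : (List.replicate 256 ([] : List String), List.replicate 256 ([] : List Int))
      = Gr (PySem.Dict.empty (κ := String) (ν := Int)).items := by
    rw [← group_eq]; rfl
  rw [h0, main_loop cmds PySem.Dict.empty PySem.Dict.nodup_keys_empty, ← h0, group_eq]
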